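-- pv_equiv track=rewrite | github.com/pedrocavalcanti-dev/MoonShield-Sensor | suricata/instalador.py | _patch_rule_files
-- ===== SOURCE A (Python) =====
-- def _patch_rule_files(conteudo: str) -> str:
--     MARCADOR = "moonshield/ms.rules"
--     ENTRADA  = "  - moonshield/ms.rules"
--
--     if MARCADOR in conteudo:
--         return conteudo
--
--     linhas   = conteudo.split("\n")
--     nova     = []
--     inserido = False
--
--     for linha in linhas:
--         nova.append(linha)
--         if not inserido and "rule-files:" in linha.lower():
--             nova.append(ENTRADA)
--             inserido = True
--
--     if not inserido:
--         nova += ["\nrule-files:", ENTRADA]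
--
--     return "\n".join(nova)
-- ===== SOURCE B (Python) =====
-- def _patch_rule_files(conteudo: str) -> str:
--     MARCADOR = "moonshield/ms.rules"
--     ENTRADA  = "  - moonshield/ms.rules"
--
--     if MARCADOR in conteudo:
--         return conteudo
--
--     linhas = conteudo.split("\n")
--     i = next((k for k, linha in enumerate(linhas)
--               if "rule-files:" in linha.lower()), None)
--     if i is None:
--         return "\n".join(linhas + ["\nrule-files:", ENTRADA])
--     return "\n".join(linhas[:i + 1] + [ENTRADA] + linhas[i + 1:])
-- ===== Notes on version B (the rewrite author's own statement) =====
-- stated objective: simpler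
-- what changed: Replaces the append-every-line loop with a mutable insertion flag by a locate-then-splice decomposition: find the index of the first matching line (case-insensitive) and insert the entry by list slicing, with the missing-section fallback handled separately.
import Mathlib
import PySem

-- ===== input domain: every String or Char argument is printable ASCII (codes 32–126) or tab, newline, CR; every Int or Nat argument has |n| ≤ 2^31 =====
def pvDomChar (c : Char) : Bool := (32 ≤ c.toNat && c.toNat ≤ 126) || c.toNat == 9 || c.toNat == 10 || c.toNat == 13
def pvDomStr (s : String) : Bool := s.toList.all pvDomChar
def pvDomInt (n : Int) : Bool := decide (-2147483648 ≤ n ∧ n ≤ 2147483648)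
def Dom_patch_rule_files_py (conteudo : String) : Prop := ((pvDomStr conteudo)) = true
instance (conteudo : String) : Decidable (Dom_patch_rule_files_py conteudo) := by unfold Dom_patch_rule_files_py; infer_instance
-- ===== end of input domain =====

-- A inserts "  - moonshield/ms.rules" after the first (case-insensitive) "rule-files:" line via a
-- flagged append loop; B locates the index of that line and splices. Same return value; B is simpler.

-- ===== PORT A =====
-- one loop step of A's 'for linha in linhas' over the state (nova, inserido)
def pvStepA (st : List String × Bool) (linha : String) : List String × Bool :=
  let nova := st.1 ++ [linha]
  if !st.2 && PySem.Str.isIn "rule-files:" (PySem.Str.lower linha) then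
    (nova ++ ["  - moonshield/ms.rules"], true)
  else (nova, st.2)

def patch_rule_files_py (conteudo : String) : String :=
  if PySem.Str.isIn "moonshield/ms.rules" conteudo then conteudo
  else
    -- conteudo.split("\n"); sep is the nonempty literal "\n", so split? is always some
    let linhas := (PySem.Str.split? conteudo "\n").getD []
    let res := linhas.foldl pvStepA ([], false)
    let nova := if !res.2 then res.1 ++ ["\nrule-files:", "  - moonshield/ms.rules"] else res.1
    PySem.Str.join "\n" nova

-- ===== PORT B =====
def patch_rule_files_py_alt (conteudo : String) : String :=
  if PySem.Str.isIn "moonshield/ms.rules" conteudo then conteudo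
  else
    let linhas := (PySem.Str.split? conteudo "\n").getD []
    -- next((k for k, linha in enumerate(linhas) if "rule-files:" in linha.lower()), None)
    match linhas.findIdx? (fun l => PySem.Str.isIn "rule-files:" (PySem.Str.lower l)) with
    | none => PySem.Str.join "\n" (linhas ++ ["\nrule-files:", "  - moonshield/ms.rules"])
    | some i =>
        PySem.Str.join "\n" (linhas.take (i + 1) ++ ["  - moonshield/ms.rules"] ++ linhas.drop (i + 1))

-- ===== PRECONDITION & SPEC =====
def Spec_patch_rule_files_py (conteudo : String) (out : String) : Prop := out = patch_rule_files_py_alt conteudo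
instance (conteudo : String) (out : String) : Decidable (Spec_patch_rule_files_py conteudo out) := by unfold Spec_patch_rule_files_py; infer_instance

-- ===== CLAIM (what is proved, stated in full; the proofs are below) =====
def Claim_equal_patch_rule_files_py : Prop := ∀ (conteudo : String), Dom_patch_rule_files_py conteudo → Spec_patch_rule_files_py conteudo (patch_rule_files_py conteudo)

-- ===== LEMMAS AND PROOFS =====

-- after the flag is set, A's loop just appends the remaining lines
theorem pvFoldA_true (ls : List String) (acc : List String) :
    ls.foldl pvStepA (acc, true) = (acc ++ ls, true) := by
  induction ls generalizing acc with
  | nil => simp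
  | cons h t ih => simp [pvStepA, ih]

-- loop characterisation: from an unset flag, A's fold equals B's locate-then-splice result
theorem pvFoldA_false (ls : List String) (acc : List String) :
    ls.foldl pvStepA (acc, false) =
      match ls.findIdx? (fun l => PySem.Str.isIn "rule-files:" (PySem.Str.lower l)) with
      | none => (acc ++ ls, false)
      | some i => (acc ++ ls.take (i + 1) ++ ["  - moonshield/ms.rules"] ++ ls.drop (i + 1), true) := by
  induction ls generalizing acc with
  | nil => simp
  | cons h t ih =>
    rw [List.findIdx?_cons]
    by_cases hp : PySem.Str.isIn "rule-files:" (PySem.Str.lower h) = true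
    · simp only [hp, List.foldl_cons]
      simp at hp
      have : pvStepA (acc, false) h = (acc ++ [h] ++ ["  - moonshield/ms.rules"], true) := by
        simp [pvStepA, hp]
      rw [this, pvFoldA_true]
      simp
    · simp only [hp]
      simp at hp
      have hstep : pvStepA (acc, false) h = (acc ++ [h], false) := by
        simp [pvStepA, hp]
      rw [List.foldl_cons, hstep, ih]
      cases hfi : t.findIdx? (fun l => PySem.Str.isIn "rule-files:" (PySem.Str.lower l)) with
      | none => simp
      | some i => simp [List.take_succ_cons, List.drop_succ_cons]

-- ===== VERDICT (by name: the statement is the Claim_ definition above) =====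
theorem patch_rule_files_py_spec : Claim_equal_patch_rule_files_py := by
  intro conteudo _
  unfold Spec_patch_rule_files_py patch_rule_files_py patch_rule_files_py_alt
  by_cases hm : PySem.Str.isIn "moonshield/ms.rules" conteudo = true
  · rw [if_pos hm, if_pos hm]
  · rw [if_neg hm, if_neg hm]
    set ls := (PySem.Str.split? conteudo "\n").getD [] with hls
    dsimp only
    rw [pvFoldA_false ls []]
    cases hfi : ls.findIdx? (fun l => PySem.Str.isIn "rule-files:" (PySem.Str.lower l)) with
    | none => simp
    | some i => simp
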